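-- pv_equiv track=rewrite | github.com/MKKL1/crack-head | src/letter_mapping.py | _cleanup_mapping
-- ===== SOURCE A (Python) =====
-- def _cleanup_mapping(mapping: dict[str, set[str]]) -> dict[str, set[str]]:
--     to_process = []
--     for char, possibilities in mapping.items():
--         if len(possibilities) == 1:
--             solved_letter = list(possibilities)[0]
--             to_process.append(solved_letter)
--
--     while to_process:
--         to_remove = to_process.pop(0)
--         for cipher_char, possibilities in mapping.items():
--             if len(possibilities) == 1:
--                 continue
--
--             if to_remove in possibilities:
--                 possibilities.remove(to_remove)
--
--                 if len(possibilities) == 1: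
--                     to_process.append(list(possibilities)[0])
--
--     return mapping
-- ===== SOURCE B (Python) =====
-- # B (alternative algorithm): one pass builds a reverse index letter -> chars whose set
-- # contains it, plus the initial queue of solved letters; propagation then walks the
-- # queue by index, each step visiting only the chars listed under that letter rather
-- # than every mapping item. Rebinds mapping[char] to a fresh set (A removes from the
-- # set in place); the equivalence claimed is about the returned value.
-- def _cleanup_mapping(mapping: dict[str, set[str]]) -> dict[str, set[str]]:
--     index: dict[str, list[str]] = {}
--     queue: list[str] = []
--     for char, possibilities in mapping.items():
--         for letter in possibilities:
--             index.setdefault(letter, []).append(char)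
--         if len(possibilities) == 1:
--             queue.append(next(iter(possibilities)))
--
--     i = 0
--     while i < len(queue):
--         letter = queue[i]
--         i += 1
--         for char in index.get(letter, ()):
--             poss = mapping[char]
--             if len(poss) > 1 and letter in poss:
--                 poss = poss - {letter}
--                 mapping[char] = poss
--                 if len(poss) == 1:
--                     queue.append(next(iter(poss)))
--     return mapping
-- ===== Notes on version B (the rewrite author's own statement) =====
-- stated objective: alternative
-- what changed: Instead of rescanning the entire mapping for every solved letter, B builds in one pass a reverse index letter->chars plus the initial queue, then walks the queue by index, each step touching only the chars whose possibility set can contain that letter.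
import Mathlib
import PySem

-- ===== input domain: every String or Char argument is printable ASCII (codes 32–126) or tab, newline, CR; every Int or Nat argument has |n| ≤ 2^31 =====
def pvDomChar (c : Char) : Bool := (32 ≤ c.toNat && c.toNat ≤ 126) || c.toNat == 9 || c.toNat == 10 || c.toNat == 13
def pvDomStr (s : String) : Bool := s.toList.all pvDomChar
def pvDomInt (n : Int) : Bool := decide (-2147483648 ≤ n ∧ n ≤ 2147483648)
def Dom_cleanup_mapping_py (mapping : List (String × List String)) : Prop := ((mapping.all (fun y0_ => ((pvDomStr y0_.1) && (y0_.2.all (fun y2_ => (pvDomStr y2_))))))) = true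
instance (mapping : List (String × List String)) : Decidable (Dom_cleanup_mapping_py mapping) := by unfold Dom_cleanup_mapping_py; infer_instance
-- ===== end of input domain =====

-- B (objective: alternative) replaces A's rescan of the whole mapping per solved
-- letter by a reverse index letter -> chars built in one pass; each propagation step
-- visits only the chars listed under that letter.
-- Python A removes from the sets in place, Python B rebinds mapping[char] to a fresh
-- set; the equivalence proved here is about the returned value.

-- ===== PORT A =====

/-- Sum of the sizes of all possibility sets (termination measure only). -/
def pvTotal (m : List (String × List String)) : Nat := (m.map (fun p => p.2.length)).sum

/-- One item of A's inner `for cipher_char, possibilities in mapping.items()` loop: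
state is (mapping rebuilt so far, letters appended to `to_process`). -/
def stepAItem (l : String) (acc : List (String × List String) × List String)
    (it : String × List String) : List (String × List String) × List String :=
  if it.2.length = 1 then (acc.1 ++ [it], acc.2)
  else if l ∈ it.2 then
    let poss' := it.2.erase l
    (acc.1 ++ [(it.1, poss')],
      if poss'.length = 1 then acc.2 ++ [poss'.headD ""] else acc.2)
  else (acc.1 ++ [it], acc.2)

/-- A's inner loop over all items for one popped letter `l`. -/
def stepA (l : String) (m : List (String × List String)) :
    List (String × List String) × List String := m.foldl (stepAItem l) ([], [])

lemma stepAItem_measure (l : String) (acc : List (String × List String) × List String)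
    (it : String × List String) :
    (stepAItem l acc it).2.length + 2 * pvTotal (stepAItem l acc it).1 ≤
      acc.2.length + 2 * pvTotal acc.1 + 2 * it.2.length := by
  unfold stepAItem
  dsimp only
  have htot : ∀ (xs : List (String × List String)) (x : String × List String),
      pvTotal (xs ++ [x]) = pvTotal xs + x.2.length := by
    intro xs x; simp [pvTotal]
  have her : l ∈ it.2 → (it.2.erase l).length = it.2.length - 1 := fun h =>
    List.length_erase_of_mem h
  have hpos : l ∈ it.2 → 0 < it.2.length := fun h => List.length_pos_of_mem h
  split_ifs with h1 h2 h3 <;>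
    simp only [htot, List.length_append, List.length_cons, List.length_nil] <;>
    [skip; specialize her h2; specialize her h2; skip] <;>
    [skip; specialize hpos h2; specialize hpos h2; skip] <;> omega

lemma stepA_fold_measure (l : String) :
    ∀ (m : List (String × List String)) (acc : List (String × List String) × List String),
    (m.foldl (stepAItem l) acc).2.length + 2 * pvTotal (m.foldl (stepAItem l) acc).1 ≤
      acc.2.length + 2 * pvTotal acc.1 + 2 * pvTotal m := by
  intro m
  induction m with
  | nil => intro acc; simp [pvTotal]
  | cons x rest ih =>
    intro acc
    have h1 := stepAItem_measure l acc x
    have h2 := ih (stepAItem l acc x)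
    simp only [List.foldl_cons] at *
    have : pvTotal (x :: rest) = x.2.length + pvTotal rest := by simp [pvTotal]
    omega

lemma stepA_measure (l : String) (m : List (String × List String)) :
    (stepA l m).2.length + 2 * pvTotal (stepA l m).1 ≤ 2 * pvTotal m := by
  have := stepA_fold_measure l m ([], [])
  simpa [stepA, pvTotal] using this

/-- A's `while to_process:` loop (`to_process.pop(0)` = structural recursion on the queue). -/
def loopA (m : List (String × List String)) (q : List String) :
    List (String × List String) :=
  match q with
  | [] => m
  | l :: q' =>
    let r := stepA l m
    loopA r.1 (q' ++ r.2)
termination_by 2 * pvTotal m + q.length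
decreasing_by
  have h := stepA_measure l m
  simp only [List.length_append, List.length_cons]
  omega

/-- A's first pass collecting the initially solved letters. -/
def initQ (m : List (String × List String)) : List String :=
  m.foldl (fun q it => if it.2.length = 1 then q ++ [it.2.headD ""] else q) []

def cleanup_mapping_py (mapping : List (String × List String)) : List (String × List String) :=
  loopA mapping (initQ mapping)

-- ===== PORT B =====

/-- `index.setdefault(letter, []).append(char)` for every letter of one possibility set. -/
def idxAdd (d : PySem.Dict String (List String)) (ch : String) (poss : List String) :
    PySem.Dict String (List String) :=
  poss.foldl (fun d l => d.modify l [] (· ++ [ch])) d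

/-- B's single build pass: the reverse index and the initial queue of solved letters. -/
def buildB (m : List (String × List String)) :
    PySem.Dict String (List String) × List String :=
  m.foldl
    (fun acc it =>
      (idxAdd acc.1 it.1 it.2,
        if it.2.length = 1 then acc.2 ++ [it.2.headD ""] else acc.2))
    (PySem.Dict.empty, [])

/-- `sum(len(s) for s in mapping.values())`: only used to size the fuel of `loopB`. -/
def pvTotalD (w : PySem.Dict String (List String)) : Nat :=
  (w.values.map List.length).sum

/-- One char from `index.get(letter, ())`: state = (working dict, letters appended to `queue`). -/
def stepBChar (l : String) (acc : PySem.Dict String (List String) × List String)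
    (ch : String) : PySem.Dict String (List String) × List String :=
  let poss := acc.1.getD ch []
  if 1 < poss.length ∧ l ∈ poss then
    let poss' := poss.erase l
    (acc.1.insert ch poss',
      if poss'.length = 1 then acc.2 ++ [poss'.headD ""] else acc.2)
  else acc

/-- B's `while i < len(queue):` loop; `fuel` only makes the recursion structural and is
chosen large enough at the call site (sufficiency is part of the equivalence proof). -/
def loopB (idx : PySem.Dict String (List String)) :
    PySem.Dict String (List String) → List String → Nat → Nat →
      PySem.Dict String (List String)
  | w, _, _, 0 => w
  | w, q, i, fuel + 1 =>
    if i < q.length then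
      let l := q.getD i ""
      let r := (idx.getD l []).foldl (stepBChar l) (w, [])
      loopB idx r.1 (q ++ r.2) (i + 1) fuel
    else w

def cleanup_mapping_py_alt (mapping : List (String × List String)) :
    List (String × List String) :=
  let b := buildB mapping
  let w := PySem.Dict.ofList mapping
  (loopB b.1 w b.2 0 (2 * pvTotalD w + b.2.length)).items

-- ===== PRECONDITION & SPEC =====
-- Pre_ restricts to the lists that actually denote a Python dict[str, set[str]]:
-- distinct keys and duplicate-free possibility lists (a dict cannot have duplicate
-- keys nor a set duplicate elements), so no real input of A is excluded.
def Pre_cleanup_mapping_py (mapping : List (String × List String)) : Prop :=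
  (mapping.map Prod.fst).Nodup ∧ ∀ p ∈ mapping, p.2.Nodup
instance (mapping : List (String × List String)) : Decidable (Pre_cleanup_mapping_py mapping) := by
  unfold Pre_cleanup_mapping_py; infer_instance

def pvWitness_cleanup_mapping_py : (List (String × List String)) :=
  [("a", ["x"]), ("b", ["x", "y"]), ("c", ["y", "z", "w"])]

def Spec_cleanup_mapping_py (mapping : List (String × List String)) (out : List (String × List String)) : Prop := out = cleanup_mapping_py_alt mapping
instance (mapping : List (String × List String)) (out : List (String × List String)) : Decidable (Spec_cleanup_mapping_py mapping out) := by unfold Spec_cleanup_mapping_py; infer_instance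

-- ===== CLAIM (what is proved, stated in full; the proofs are below) =====
def Claim_equal_cleanup_mapping_py : Prop := ∀ (mapping : List (String × List String)), Dom_cleanup_mapping_py mapping → Pre_cleanup_mapping_py mapping → Spec_cleanup_mapping_py mapping (cleanup_mapping_py mapping)

-- ===== LEMMAS AND PROOFS =====

/-- What `stepAItem` does to one item, as a function. -/
def procItem (l : String) (p : String × List String) : String × List String :=
  if p.2.length = 1 then p else if l ∈ p.2 then (p.1, p.2.erase l) else p

/-- The letters one item appends to the queue. -/
def newSolved (l : String) (p : String × List String) : List String :=
  if p.2.length ≠ 1 ∧ l ∈ p.2 ∧ (p.2.erase l).length = 1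
  then [(p.2.erase l).headD ""] else []

lemma stepA_fold_char (l : String) :
    ∀ (m : List (String × List String)) (acc : List (String × List String) × List String),
    m.foldl (stepAItem l) acc = (acc.1 ++ m.map (procItem l), acc.2 ++ m.flatMap (newSolved l)) := by
  intro m
  induction m with
  | nil => intro acc; simp
  | cons it rest ih =>
    intro acc
    simp only [List.foldl_cons, List.map_cons, List.flatMap_cons]
    rw [ih]
    have h1 : (stepAItem l acc it).1 = acc.1 ++ [procItem l it] := by
      unfold stepAItem procItem; dsimp only; split_ifs <;> rfl
    have h2 : (stepAItem l acc it).2 = acc.2 ++ newSolved l it := by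
      unfold stepAItem newSolved; dsimp only
      split_ifs with hA hB hC hD hE <;> simp_all
    rw [h1, h2]
    simp

lemma stepA_char (l : String) (m : List (String × List String)) :
    stepA l m = (m.map (procItem l), m.flatMap (newSolved l)) := by
  have := stepA_fold_char l m ([], [])
  simpa [stepA] using this

/-- Proof-side view of B's dict lookup: `mapping[ch]` on the items list (first binding). -/
def pvGetVal : List (String × List String) → String → List String
  | [], _ => []
  | p :: rest, ch => if p.1 = ch then p.2 else pvGetVal rest ch

lemma mk_getD (m : List (String × List String)) (ch : String) :
    (PySem.Dict.mk m).getD ch [] = pvGetVal m ch := by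
  induction m with
  | nil => rfl
  | cons p rest ih =>
    rw [PySem.Dict.getD_eq_get?_getD, PySem.Dict.get?_mk_cons]
    rw [PySem.Dict.getD_eq_get?_getD] at ih
    simp only [pvGetVal]
    by_cases h : p.1 = ch
    · simp [h]
    · simp only [h, if_false, beq_iff_eq]
      exact ih

lemma foldB_acc (l : String) :
    ∀ (idxl : List String) (m : PySem.Dict String (List String)) (q : List String),
    idxl.foldl (stepBChar l) (m, q) =
      ((idxl.foldl (stepBChar l) (m, [])).1, q ++ (idxl.foldl (stepBChar l) (m, [])).2) := by
  intro idxl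
  induction idxl with
  | nil => intro m q; simp
  | cons ch rest ih =>
    intro m q
    simp only [List.foldl_cons]
    have hstep : stepBChar l (m, q) ch =
        ((stepBChar l (m, []) ch).1, q ++ (stepBChar l (m, []) ch).2) := by
      unfold stepBChar; dsimp only; split_ifs <;> simp
    rw [hstep]
    obtain ⟨m₁, q₁⟩ := stepBChar l (m, []) ch
    rw [ih m₁ (q ++ q₁), ih m₁ q₁]
    simp

lemma keySplit {ch : String} {rest : List String} {m : List (String × List String)}
    (h : (ch :: rest).Sublist (m.map Prod.fst)) :
    ∃ m₁ poss m₂, m = m₁ ++ (ch, poss) :: m₂ ∧ rest.Sublist (m₂.map Prod.fst) := by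
  rcases List.cons_sublist_iff.mp h with ⟨r₁, r₂, hk, hmem, hrest⟩
  rcases List.append_of_mem hmem with ⟨s₁, s₂, rfl⟩
  have hk' : m.map Prod.fst = s₁ ++ ch :: (s₂ ++ r₂) := by
    rw [hk]; simp
  rcases List.map_eq_append_iff.mp hk' with ⟨m₁, m', hm, hm₁, hm'⟩
  rcases List.map_eq_cons_iff.mp hm' with ⟨p, m₂, hm2, hfst, hm₂⟩
  refine ⟨m₁, p.2, m₂, ?_, ?_⟩
  · rw [hm, hm2, ← hfst]
  · have h1 : rest.Sublist (s₂ ++ r₂) :=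
      hrest.trans (List.sublist_append_right s₂ r₂)
    rw [hm₂]; exact h1

lemma getVal_append_cons (m₁ m₂ : List (String × List String)) (poss : List String)
    (ch : String) (h : ch ∉ m₁.map Prod.fst) :
    pvGetVal (m₁ ++ (ch, poss) :: m₂) ch = poss := by
  induction m₁ with
  | nil => simp [pvGetVal]
  | cons p rest ih =>
    simp only [List.map_cons, List.mem_cons, not_or] at h
    simp only [List.cons_append, pvGetVal]
    rw [if_neg (fun he => h.1 he.symm)]
    exact ih h.2

lemma map_setIf_eq_self (m : List (String × List String)) (ch : String) (v : List String)
    (h : ch ∉ m.map Prod.fst) :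
    m.map (fun p => if (p.1 == ch) = true then (ch, v) else p) = m := by
  induction m with
  | nil => rfl
  | cons p rest ih =>
    simp only [List.map_cons, List.mem_cons, not_or] at h
    simp only [List.map_cons]
    rw [if_neg (by simpa using fun he : p.1 = ch => h.1 he.symm), ih h.2]

lemma mk_insert_mid (m₁ m₂ : List (String × List String)) (poss v : List String)
    (ch : String) (h1 : ch ∉ m₁.map Prod.fst) (h2 : ch ∉ m₂.map Prod.fst) :
    (PySem.Dict.mk (m₁ ++ (ch, poss) :: m₂)).insert ch v = PySem.Dict.mk (m₁ ++ (ch, v) :: m₂) := by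
  apply PySem.Dict.ext
  have hc : (PySem.Dict.mk (m₁ ++ (ch, poss) :: m₂)).contains ch = true := by
    rw [PySem.Dict.contains_eq_decide_mem_keys]
    simp [PySem.Dict.keys]
  rw [PySem.Dict.items_insert_of_contains _ _ hc]
  show List.map (fun p => if (p.1 == ch) = true then (ch, v) else p) (m₁ ++ (ch, poss) :: m₂) = _
  rw [List.map_append, List.map_cons, map_setIf_eq_self _ _ _ h1, map_setIf_eq_self _ _ _ h2]
  simp

lemma proc_eq_self {l : String} {p : String × List String}
    (h : l ∈ p.2 → p.2.length = 1) : procItem l p = p := by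
  unfold procItem
  split_ifs with h1 h2
  · rfl
  · exact absurd (h h2) h1
  · rfl

lemma ns_eq_nil {l : String} {p : String × List String}
    (h : l ∈ p.2 → p.2.length = 1) : newSolved l p = [] := by
  unfold newSolved
  rw [if_neg]
  rintro ⟨h1, h2, -⟩
  exact h1 (h h2)

lemma getD_idxAdd {l : String} (ch : String) :
    ∀ (poss : List String) (d : PySem.Dict String (List String)), poss.Nodup →
    (idxAdd d ch poss).getD l [] = d.getD l [] ++ (if l ∈ poss then [ch] else []) := by
  intro poss
  induction poss with
  | nil => intro d _; simp [idxAdd]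
  | cons x rest ih =>
    intro d hnd
    rcases List.nodup_cons.mp hnd with ⟨hx, hrest⟩
    simp only [idxAdd, List.foldl_cons]
    rw [show (List.foldl (fun d l => d.modify l [] (· ++ [ch])) (d.modify x [] (· ++ [ch])) rest) = idxAdd (d.modify x [] (· ++ [ch])) ch rest from rfl]
    rw [ih _ hrest, PySem.Dict.getD_modify]
    by_cases hlx : l = x
    · subst hlx
      simp [hx]
    · simp [hlx, List.mem_cons]

lemma buildB_fst_getD (l : String) :
    ∀ (m : List (String × List String)) (d : PySem.Dict String (List String)) (q : List String),
    (∀ p ∈ m, p.2.Nodup) →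
    ((m.foldl (fun acc it => (idxAdd acc.1 it.1 it.2,
        if it.2.length = 1 then acc.2 ++ [it.2.headD ""] else acc.2)) (d, q)).1).getD l [] =
      d.getD l [] ++ (m.filter (fun p => decide (l ∈ p.2))).map Prod.fst := by
  intro m
  induction m with
  | nil => intro d q _; simp
  | cons it rest ih =>
    intro d q hpn
    simp only [List.foldl_cons]
    rw [ih _ _ (fun p hp => hpn p (List.mem_cons_of_mem _ hp))]
    rw [getD_idxAdd it.1 it.2 d (hpn it (List.mem_cons_self))]
    by_cases hl : l ∈ it.2 <;> simp [hl]

lemma buildB_snd :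
    ∀ (m : List (String × List String)) (d : PySem.Dict String (List String)) (q : List String),
    (m.foldl (fun acc it => (idxAdd acc.1 it.1 it.2,
        if it.2.length = 1 then acc.2 ++ [it.2.headD ""] else acc.2)) (d, q)).2 =
      m.foldl (fun q it => if it.2.length = 1 then q ++ [it.2.headD ""] else q) q := by
  intro m
  induction m with
  | nil => intro d q; rfl
  | cons it rest ih =>
    intro d q
    simp only [List.foldl_cons]
    exact ih _ _

/-- B's current mapping has the same keys as the original and each value is a
sub-(list of the) original value. -/
def pvDerived (m₀ m : List (String × List String)) : Prop :=
  List.Forall₂ (fun p q => p.1 = q.1 ∧ q.2.Sublist p.2) m₀ m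

lemma derived_keys {m₀ m : List (String × List String)} (h : pvDerived m₀ m) :
    m.map Prod.fst = m₀.map Prod.fst := by
  induction h with
  | nil => rfl
  | cons hpq _ ih => simp only [List.map_cons, ih, hpq.1]

lemma derived_mem {m₀ m : List (String × List String)} (h : pvDerived m₀ m)
    {p : String × List String} (hp : p ∈ m) :
    ∃ p₀ ∈ m₀, p.1 = p₀.1 ∧ p.2.Sublist p₀.2 := by
  induction h with
  | nil => cases hp
  | cons hpq _ ih =>
    rcases List.mem_cons.mp hp with h | h
    · subst h; exact ⟨_, List.mem_cons_self, hpq.1.symm, hpq.2⟩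
    · rcases ih h with ⟨p₀, hp₀, h1, h2⟩
      exact ⟨p₀, List.mem_cons_of_mem _ hp₀, h1, h2⟩

lemma derived_step {m₀ m : List (String × List String)} (l : String)
    (h : pvDerived m₀ m) : pvDerived m₀ (m.map (procItem l)) := by
  induction h with
  | nil => exact List.Forall₂.nil
  | cons hpq htail ih =>
    refine List.Forall₂.cons ?_ ih
    have hfst : ∀ (q : String × List String), (procItem l q).1 = q.1 := by
      intro q; unfold procItem; split_ifs <;> rfl
    have hsnd : ∀ (q : String × List String), (procItem l q).2.Sublist q.2 := by
      intro q; unfold procItem; split_ifs <;> first | exact List.Sublist.refl _ | exact List.erase_sublist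
    exact ⟨hpq.1.trans (hfst _).symm, (hsnd _).trans hpq.2⟩

lemma main_step (l : String) :
    ∀ (idxl : List String) (m : List (String × List String)),
    idxl.Sublist (m.map Prod.fst) →
    (m.map Prod.fst).Nodup →
    (∀ p ∈ m, p.2.Nodup) →
    (∀ p ∈ m, l ∈ p.2 → p.2.length ≠ 1 → p.1 ∈ idxl) →
    idxl.foldl (stepBChar l) (PySem.Dict.mk m, []) =
      (PySem.Dict.mk (m.map (procItem l)), m.flatMap (newSolved l)) := by
  intro idxl
  induction idxl with
  | nil =>
    intro m _ _ _ hcov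
    simp only [List.foldl_nil, Prod.mk.injEq]
    have hs : ∀ p ∈ m, l ∈ p.2 → p.2.length = 1 := by
      intro p hp hl
      by_contra hne
      exact absurd (hcov p hp hl hne) (List.not_mem_nil)
    constructor
    · have : m.map (procItem l) = m.map id :=
        List.map_congr_left (fun p hp => proc_eq_self (hs p hp))
      simp [this]
    · symm
      rw [List.flatMap_eq_nil_iff]
      exact fun p hp => ns_eq_nil (hs p hp)
  | cons ch rest ih =>
    intro m hsub hkn hpn hcov
    obtain ⟨m₁, poss, m₂, rfl, hrest⟩ := keySplit hsub
    have hkn' := hkn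
    rw [List.map_append, List.map_cons, List.nodup_append] at hkn'
    obtain ⟨hn₁, hn₂, hdisj⟩ := hkn'
    have hch1 : ch ∉ m₁.map Prod.fst := fun hin =>
      (hdisj ch hin ch List.mem_cons_self) rfl
    have hch2 : ch ∉ m₂.map Prod.fst := (List.nodup_cons.mp hn₂).1
    have hposs : poss.Nodup := hpn (ch, poss) (by simp)
    have hgv : (PySem.Dict.mk (m₁ ++ (ch, poss) :: m₂)).getD ch [] = poss := by
      rw [mk_getD]; exact getVal_append_cons _ _ _ _ hch1
    have hrest_sub : ∀ (v : List String),
        rest.Sublist ((m₁ ++ (ch, v) :: m₂).map Prod.fst) := by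
      intro v
      rw [List.map_append, List.map_cons]
      exact (hrest.trans (List.sublist_cons_self _ _)).trans
        (List.sublist_append_right _ _)
    have hdisj1 : ∀ p ∈ m₁, p.1 ∉ (ch :: rest) := by
      intro p hp hin
      have hp1 : p.1 ∈ m₁.map Prod.fst := List.mem_map_of_mem hp
      rcases List.mem_cons.mp hin with h | h
      · exact (hdisj p.1 hp1 ch List.mem_cons_self) h
      · have : p.1 ∈ m₂.map Prod.fst := hrest.subset h
        exact (hdisj p.1 hp1 p.1 (List.mem_cons_of_mem _ this)) rfl
    simp only [List.foldl_cons]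
    by_cases hg : 1 < poss.length ∧ l ∈ poss
    · -- the guard fires: erase l from poss
      have hstep : stepBChar l (PySem.Dict.mk (m₁ ++ (ch, poss) :: m₂), []) ch =
          (PySem.Dict.mk (m₁ ++ (ch, poss.erase l) :: m₂), newSolved l (ch, poss)) := by
        unfold stepBChar
        dsimp only
        rw [hgv, if_pos hg, mk_insert_mid _ _ _ _ _ hch1 hch2]
        unfold newSolved
        have hne : poss.length ≠ 1 := by omega
        simp [hne, hg.2]
      rw [hstep]
      set m' := m₁ ++ (ch, poss.erase l) :: m₂ with hm'
      have hlnotin : l ∉ poss.erase l := by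
        intro hmem
        exact absurd ((hposs.mem_erase_iff).mp hmem).1 (by simp)
      have hih := ih m' (hrest_sub _)
        (by
          rw [hm', List.map_append, List.map_cons]
          rw [List.map_append, List.map_cons] at hkn
          exact hkn)
        (by
          intro p hp
          rw [hm'] at hp
          rcases List.mem_append.mp hp with h | h
          · exact hpn p (List.mem_append_left _ h)
          · rcases List.mem_cons.mp h with h | h
            · subst h; exact hposs.erase l
            · exact hpn p (by simp [h]))
        (by
          intro p hp hl hlen
          rw [hm'] at hp
          rcases List.mem_append.mp hp with h | h
          · have := hcov p (List.mem_append_left _ h) hl hlen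
            rcases List.mem_cons.mp this with h' | h'
            · exact absurd (h' ▸ this) (fun _ => (hdisj1 p h) this)
            · exact h'
          · rcases List.mem_cons.mp h with h | h
            · subst h; exact absurd hl hlnotin
            · have hcv := hcov p (by simp [h]) hl hlen
              rcases List.mem_cons.mp hcv with h' | h'
              · exfalso
                have : p.1 ∈ m₂.map Prod.fst := List.mem_map_of_mem h
                rw [h'] at this
                exact hch2 this
              · exact h')
      rw [foldB_acc l rest _ (newSolved l (ch, poss)), hih]
      have hproc_ch : procItem l (ch, poss) = (ch, poss.erase l) := by
        unfold procItem
        have hne : poss.length ≠ 1 := by omega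
        simp [hne, hg.2]
      have hproc_ch' : procItem l (ch, poss.erase l) = (ch, poss.erase l) :=
        proc_eq_self (fun hmem => absurd hmem hlnotin)
      have hns_ch' : newSolved l (ch, poss.erase l) = [] :=
        ns_eq_nil (fun hmem => absurd hmem hlnotin)
      have hm₁ns : m₁.flatMap (newSolved l) = [] := by
        rw [List.flatMap_eq_nil_iff]
        intro p hp
        unfold newSolved
        rw [if_neg]
        rintro ⟨h1, h2, -⟩
        exact hdisj1 p hp (hcov p (List.mem_append_left _ hp) h2 h1)
      rw [hm']
      simp only [List.map_append, List.map_cons, List.flatMap_append, List.flatMap_cons,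
        hproc_ch, hproc_ch', hns_ch', hm₁ns, Prod.mk.injEq]
      constructor
      · trivial
      · simp
    · -- the guard does not fire: no-op for this char
      have hstep : stepBChar l (PySem.Dict.mk (m₁ ++ (ch, poss) :: m₂), []) ch =
          (PySem.Dict.mk (m₁ ++ (ch, poss) :: m₂), []) := by
        unfold stepBChar
        dsimp only
        rw [hgv, if_neg hg]
      rw [hstep]
      refine ih _ (hrest_sub _) hkn hpn ?_
      intro p hp hl hlen
      have hcv := hcov p hp hl hlen
      rcases List.mem_cons.mp hcv with h' | h'
      · exfalso
        rcases List.mem_append.mp hp with h | h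
        · exact hdisj1 p h (h' ▸ List.mem_cons_self)
        · rcases List.mem_cons.mp h with h | h
          · subst h
            dsimp at h' hl hlen
            have : 1 < poss.length := by
              have := List.length_pos_of_mem hl
              omega
            exact hg ⟨this, hl⟩
          · exact hch2 (h' ▸ List.mem_map_of_mem h)
      · exact h'

lemma loop_eq (m₀ : List (String × List String)) (idx : PySem.Dict String (List String))
    (hkn : (m₀.map Prod.fst).Nodup)
    (hpn : ∀ p ∈ m₀, p.2.Nodup)
    (hsub : ∀ l, (idx.getD l []).Sublist (m₀.map Prod.fst))
    (hcov : ∀ p ∈ m₀, ∀ l ∈ p.2, p.1 ∈ idx.getD l []) :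
    ∀ (n : Nat) (q : List String) (i : Nat) (m : List (String × List String)),
      2 * pvTotal m + (q.length - i) ≤ n → pvDerived m₀ m →
      loopB idx (PySem.Dict.mk m) q i n = PySem.Dict.mk (loopA m (q.drop i)) := by
  intro n
  induction n with
  | zero =>
    intro q i m hle hd
    have hiq : q.length ≤ i := by omega
    rw [loopB, List.drop_eq_nil_of_le hiq, loopA]
  | succ n ihn =>
    intro q i m hle hd
    by_cases h : i < q.length
    · rw [loopB, if_pos h]
      dsimp only
      have hdrop : q.drop i = q.getD i "" :: q.drop (i + 1) := by
        rw [List.drop_eq_getElem_cons h, List.getD_eq_getElem q "" h]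
      rw [hdrop, loopA]
      set l := q.getD i "" with hl
      have hpn' : ∀ p ∈ m, p.2.Nodup := by
        intro p hp
        obtain ⟨p₀, hp₀, _, hsl⟩ := derived_mem hd hp
        exact hsl.nodup (hpn p₀ hp₀)
      have hcov' : ∀ p ∈ m, l ∈ p.2 → p.2.length ≠ 1 → p.1 ∈ idx.getD l [] := by
        intro p hp hlp _
        obtain ⟨p₀, hp₀, hfst, hsl⟩ := derived_mem hd hp
        rw [hfst]
        exact hcov p₀ hp₀ l (hsl.subset hlp)
      have hsub' : (idx.getD l []).Sublist (m.map Prod.fst) := by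
        rw [derived_keys hd]; exact hsub l
      have hkn' : (m.map Prod.fst).Nodup := by rw [derived_keys hd]; exact hkn
      have hmain := main_step l (idx.getD l []) m hsub' hkn' hpn' hcov'
      have hstepA := stepA_char l m
      rw [hmain]
      have hmeas := stepA_measure l m
      rw [hstepA] at hmeas
      have hih := ihn (q ++ m.flatMap (newSolved l)) (i + 1) (m.map (procItem l))
        (by
          simp only [List.length_append]
          have hpt : pvTotal (m.map (procItem l)) = pvTotal ((stepA l m).1) := by
            rw [hstepA]
          rw [hpt] at *
          simp only [hstepA] at hmeas ⊢
          omega)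
        (derived_step l hd)
      rw [hih]
      have hdrop2 : (q ++ m.flatMap (newSolved l)).drop (i + 1) =
          q.drop (i + 1) ++ m.flatMap (newSolved l) :=
        List.drop_append_of_le_length (by omega)
      rw [hdrop2]
      congr 1
      rw [hstepA]
    · rw [loopB, if_neg h, List.drop_eq_nil_of_le (by omega), loopA]

lemma ofList_eq_mk (m : List (String × List String)) (h : (m.map Prod.fst).Nodup) :
    PySem.Dict.ofList m = PySem.Dict.mk m := by
  apply PySem.Dict.ext
  have hfresh : ∀ p ∈ m, (PySem.Dict.empty : PySem.Dict String (List String)).contains p.1 = false := by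
    intro p _; exact PySem.Dict.contains_empty _
  have := PySem.Dict.items_foldl_insert_fresh m Prod.fst Prod.snd PySem.Dict.empty hfresh h
  show (PySem.Dict.empty.update m).items = m
  rw [PySem.Dict.update]
  simpa using this

lemma pvTotalD_mk (m : List (String × List String)) :
    pvTotalD (PySem.Dict.mk m) = pvTotal m := by
  simp [pvTotalD, pvTotal, PySem.Dict.values, List.map_map, Function.comp_def]

-- ===== VERDICT (by name: the statement is the Claim_ definition above) =====
theorem cleanup_mapping_py_spec : Claim_equal_cleanup_mapping_py := by
  intro mapping _ hpre
  obtain ⟨hkn, hpn⟩ := hpre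
  unfold Spec_cleanup_mapping_py cleanup_mapping_py cleanup_mapping_py_alt
  dsimp only
  have hq : (buildB mapping).2 = initQ mapping := by
    unfold buildB initQ
    exact buildB_snd mapping PySem.Dict.empty []
  have hchar : ∀ l', (buildB mapping).1.getD l' [] =
      (mapping.filter (fun p => decide (l' ∈ p.2))).map Prod.fst := by
    intro l'
    unfold buildB
    rw [buildB_fst_getD l' mapping PySem.Dict.empty [] hpn]
    simp
  have hsub : ∀ l', ((buildB mapping).1.getD l' []).Sublist (mapping.map Prod.fst) := by
    intro l'
    rw [hchar l']
    exact List.Sublist.map Prod.fst List.filter_sublist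
  have hcov : ∀ p ∈ mapping, ∀ l' ∈ p.2, p.1 ∈ (buildB mapping).1.getD l' [] := by
    intro p hp l' hl'
    rw [hchar l']
    exact List.mem_map_of_mem (List.mem_filter.mpr ⟨hp, by simpa using hl'⟩)
  rw [hq, ofList_eq_mk mapping hkn, pvTotalD_mk]
  rw [loop_eq mapping (buildB mapping).1 hkn hpn hsub hcov
    (2 * pvTotal mapping + (initQ mapping).length) (initQ mapping) 0 mapping
    (by omega)
    (List.forall₂_same.mpr (fun p _ => ⟨rfl, List.Sublist.refl _⟩))]
  rw [List.drop_zero]
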